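-- pv_equiv track=rewrite | github.com/daniel-reich/turbo-robot | en35WbjkDF9ej59FW_17.py | ends_add_to_10
-- ===== SOURCE A (Python) =====
-- def ends_add_to_10(nums):
--   for i in range(0,len(nums)):
--     if nums[i] < 0:
--       nums[i] *= -1
--   tally = 0
--   brr = map(str,nums)
--   for x in brr:
--     if int(list(x)[0]) + int(list(x)[-1]) == 10:
--       tally += 1
--   return tally
-- ===== SOURCE B (Python) =====
-- def ends_add_to_10(nums):
--   # same in-place normalisation of negatives as the original (observable mutation preserved)
--   for i in range(0, len(nums)):
--     if nums[i] < 0: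
--       nums[i] *= -1
--   count = 0
--   for n in nums:
--     last = n % 10
--     first = n
--     while first >= 10:
--       first //= 10
--     if first + last == 10:
--       count += 1
--   return count
-- ===== Notes on version B (the rewrite author's own statement) =====
-- stated objective: idiomatic
-- what changed: Replaces per-number str() conversion and character indexing with pure arithmetic digit extraction (last = n % 10, first by repeated floor division), keeping the in-place negation loop.
import Mathlib
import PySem

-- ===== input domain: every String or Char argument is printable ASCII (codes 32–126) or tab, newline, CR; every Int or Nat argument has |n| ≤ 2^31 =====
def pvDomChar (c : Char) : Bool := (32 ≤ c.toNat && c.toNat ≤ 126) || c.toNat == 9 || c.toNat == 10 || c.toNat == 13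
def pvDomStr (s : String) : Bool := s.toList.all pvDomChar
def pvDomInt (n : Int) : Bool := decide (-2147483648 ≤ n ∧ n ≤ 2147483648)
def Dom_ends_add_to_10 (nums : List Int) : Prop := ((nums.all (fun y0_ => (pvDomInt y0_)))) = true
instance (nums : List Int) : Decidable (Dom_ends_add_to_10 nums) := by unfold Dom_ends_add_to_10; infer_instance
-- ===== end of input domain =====

-- B replaces str() conversion and character indexing by arithmetic digit extraction (n % 10 and
-- repeated floor division); equivalence is about the RETURN value (both Pythons mutate nums the same way).

-- ===== PORT A =====
-- Python: `if int(list(x)[0]) + int(list(x)[-1]) == 10`.  The `none` branches below correspond to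
-- IndexError/ValueError, which Python never reaches here (str(n) is a nonempty string).
def pvStepA (tally : Int) (x : List Char) : Int :=
  match PySem.List.pyGet? x 0, PySem.List.pyGet? x (-1) with
  | some c0, some c1 =>
    match PySem.Int.ofChars? [c0], PySem.Int.ofChars? [c1] with
    | some a, some b => if a + b = 10 then tally + 1 else tally
    | _, _ => tally
  | _, _ => tally

def ends_add_to_10 (nums : List Int) : Int :=
  -- first loop: nums[i] *= -1 for negatives (in-place in Python; here the updated list)
  let nums := nums.map (fun v => if v < 0 then v * -1 else v)
  -- brr = map(str, nums); then the tally loop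
  let brr := nums.map PySem.Int.toChars
  brr.foldl pvStepA 0

-- ===== PORT B =====
-- `while first >= 10: first //= 10`
def pvFirstLoop (first : Int) : Int :=
  if _h : 10 ≤ first then pvFirstLoop (PySem.Int.floordiv first 10) else first
termination_by first.toNat
decreasing_by
  rw [PySem.Int.floordiv_eq_ediv_of_pos (by omega : (0:Int) < 10)]
  omega

def pvStepB (count : Int) (n : Int) : Int :=
  let last := PySem.Int.mod n 10
  let first := pvFirstLoop n
  if first + last = 10 then count + 1 else count

def ends_add_to_10_alt (nums : List Int) : Int :=
  let nums := nums.map (fun v => if v < 0 then v * -1 else v)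
  nums.foldl pvStepB 0

-- ===== PRECONDITION & SPEC =====
def Spec_ends_add_to_10 (nums : List Int) (out : Int) : Prop := out = ends_add_to_10_alt nums
instance (nums : List Int) (out : Int) : Decidable (Spec_ends_add_to_10 nums out) := by unfold Spec_ends_add_to_10; infer_instance

-- ===== CLAIM (what is proved, stated in full; the proofs are below) =====
def Claim_equal_ends_add_to_10 : Prop := ∀ (nums : List Int), Dom_ends_add_to_10 nums → Spec_ends_add_to_10 nums (ends_add_to_10 nums)

-- ===== LEMMAS AND PROOFS =====

-- leading decimal digit of a natural number (proof-side mirror of pvFirstLoop)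
def pvLead (m : Nat) : Nat :=
  if 10 ≤ m then pvLead (m / 10) else m
decreasing_by omega

theorem pvLead_lt_ten (m : Nat) : pvLead m < 10 := by
  induction m using pvLead.induct with
  | case1 m h ih => rw [pvLead]; simpa [h] using ih
  | case2 m h => rw [pvLead]; simp [h]; omega

theorem pvFirstLoop_natCast (m : Nat) : pvFirstLoop (m : Int) = (pvLead m : Int) := by
  induction m using pvLead.induct with
  | case1 m h ih =>
    rw [pvFirstLoop, pvLead]
    have h' : (10:Int) ≤ (m : Int) := by exact_mod_cast h
    simp only [h', dif_pos, if_pos h]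
    rw [show PySem.Int.floordiv (m : Int) 10 = ((m / 10 : Nat) : Int) from
      (by exact_mod_cast PySem.Int.floordiv_natCast m 10)]
    exact ih
  | case2 m h =>
    rw [pvFirstLoop, pvLead]
    have h' : ¬ (10:Int) ≤ (m : Int) := by exact_mod_cast h
    simp [h', h]

-- toDigitsCore: enough fuel makes the fuel irrelevant
theorem pvToDigitsCore_fuel (f₁ f₂ n : Nat) (l : List Char) (h₁ : n < f₁) (h₂ : n < f₂) :
    Nat.toDigitsCore 10 f₁ n l = Nat.toDigitsCore 10 f₂ n l := by
  induction f₁ generalizing f₂ n l with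
  | zero => omega
  | succ f₁ ih =>
    cases f₂ with
    | zero => omega
    | succ f₂ =>
      simp only [Nat.toDigitsCore]
      by_cases hd : n / 10 = 0
      · simp [hd]
      · simp only [hd, if_false]
        exact ih f₂ (n / 10) _ (by omega) (by omega)

theorem pvToDigitsCore_acc (f n : Nat) (l : List Char) :
    Nat.toDigitsCore 10 f n l = Nat.toDigitsCore 10 f n [] ++ l := by
  induction f generalizing n l with
  | zero => simp [Nat.toDigitsCore]
  | succ f ih =>
    simp only [Nat.toDigitsCore]
    by_cases hd : n / 10 = 0
    · simp [hd]
    · simp only [hd, if_false]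
      rw [ih (n / 10) (Nat.digitChar (n % 10) :: l), ih (n / 10) [Nat.digitChar (n % 10)]]
      simp

theorem pvToDigits_small (n : Nat) (h : n < 10) : Nat.toDigits 10 n = [Nat.digitChar n] := by
  unfold Nat.toDigits
  simp [Nat.toDigitsCore, Nat.div_eq_of_lt h, Nat.mod_eq_of_lt h]

theorem pvToDigits_step (n : Nat) (h : 10 ≤ n) :
    Nat.toDigits 10 n = Nat.toDigits 10 (n / 10) ++ [Nat.digitChar (n % 10)] := by
  have hn : ¬ n / 10 = 0 := by omega
  conv_lhs => rw [Nat.toDigits, Nat.toDigitsCore]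
  rw [if_neg hn, pvToDigitsCore_acc,
    pvToDigitsCore_fuel n (n / 10 + 1) (n / 10) [] (by omega) (by omega), Nat.toDigits]

theorem pvToDigits_ne_nil (n : Nat) : Nat.toDigits 10 n ≠ [] := by
  by_cases h : 10 ≤ n
  · rw [pvToDigits_step n h]; simp
  · rw [pvToDigits_small n (by omega)]; simp

theorem pvToDigits_head (n : Nat) : (Nat.toDigits 10 n).head? = some (Nat.digitChar (pvLead n)) := by
  induction n using pvLead.induct with
  | case1 n h ih =>
    rw [pvToDigits_step n h, pvLead, if_pos h]
    rw [List.head?_append_of_ne_nil _ (pvToDigits_ne_nil _)]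
    exact ih
  | case2 n h =>
    rw [pvToDigits_small n (by omega), pvLead, if_neg h]
    rfl

theorem pvToDigits_last (n : Nat) : (Nat.toDigits 10 n).getLast? = some (Nat.digitChar (n % 10)) := by
  by_cases h : 10 ≤ n
  · rw [pvToDigits_step n h]; simp
  · rw [pvToDigits_small n (by omega), Nat.mod_eq_of_lt (by omega)]; rfl

theorem pvOfChars_digitChar (d : Nat) (hd : d < 10) :
    PySem.Int.ofChars? [Nat.digitChar d] = some (d : Int) := by
  interval_cases d <;> decide

theorem pvGet_zero {α : Type} (xs : List α) (h : xs ≠ []) :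
    PySem.List.pyGet? xs 0 = xs.head? := by
  cases xs with
  | nil => simp at h
  | cons a l => simp [PySem.List.pyGet?, PySem.List.pyIdx?]

theorem pvGet_neg_one {α : Type} (xs : List α) (h : xs ≠ []) :
    PySem.List.pyGet? xs (-1) = xs.getLast? := by
  have hl : 0 < xs.length := List.length_pos_iff.mpr h
  simp only [PySem.List.pyGet?, PySem.List.pyIdx?]
  have h1 : ¬ (0:Int) ≤ -1 := by omega
  have h2 : -(xs.length : Int) ≤ -1 := by omega
  simp only [h1, if_false, h2, if_true, Option.bind_some]
  have : xs.length - ((1:Int)).toNat = xs.length - 1 := rfl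
  simp only [Int.neg_neg, this]
  rw [List.getElem?_eq_getElem (by omega), List.getLast?_eq_getElem?,
    List.getElem?_eq_getElem (by omega)]

-- the per-element step functions agree on nonnegative inputs
theorem pvStep_eq (tally : Int) (m : Nat) :
    pvStepA tally (PySem.Int.toChars (m : Int)) = pvStepB tally (m : Int) := by
  have htc : PySem.Int.toChars (m : Int) = Nat.toDigits 10 m := by
    simp [PySem.Int.toChars]
  rw [pvStepA, htc, pvGet_zero _ (pvToDigits_ne_nil m), pvGet_neg_one _ (pvToDigits_ne_nil m),
    pvToDigits_head, pvToDigits_last]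
  dsimp only
  rw [pvOfChars_digitChar _ (pvLead_lt_ten m), pvOfChars_digitChar _ (Nat.mod_lt m (by omega))]
  rw [pvStepB, pvFirstLoop_natCast]
  have hmod : PySem.Int.mod (m : Int) 10 = ((m % 10 : Nat) : Int) := by
    exact_mod_cast PySem.Int.mod_natCast m 10
  rw [hmod]

theorem pvAbs_natCast (v : Int) : ∃ m : Nat, (if v < 0 then v * -1 else v) = (m : Int) := by
  by_cases h : v < 0
  · exact ⟨(-v).toNat, by simp [h]; omega⟩
  · exact ⟨v.toNat, by simp [h]; omega⟩

-- ===== VERDICT (by name: the statement is the Claim_ definition above) =====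
theorem ends_add_to_10_spec : Claim_equal_ends_add_to_10 := by
  intro nums hdom
  clear hdom
  unfold Spec_ends_add_to_10 ends_add_to_10 ends_add_to_10_alt
  rw [List.foldl_map]
  induction nums using List.reverseRecOn with
  | nil => rfl
  | append_singleton l v ih =>
    obtain ⟨m, hm⟩ := pvAbs_natCast v
    simp only [List.map_append, List.map_cons, List.map_nil, List.foldl_append, List.foldl_cons,
      List.foldl_nil, hm, pvStep_eq, ih]
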